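-- pv_equiv track=rewrite | github.com/FutureReality/AnalizadorDeRegistros | analizador.py | tipos
-- ===== SOURCE A (Python) =====
-- def tipos(linea):
--     tipo_error = []
--     tipo_warning = []
--     tipo_info = []
--
--     linea = linea.lower()
--     palabras = linea.split()
--
--     for palabra in palabras:
--         if palabra == "info:":
--             tipo_info.append(linea)
--         if palabra == "error:":
--             tipo_error.append(linea)
--         if palabra == "warning:":
--             tipo_warning.append(linea)
--
--     return tipo_error, tipo_info, tipo_warning
-- ===== SOURCE B (Python) =====
-- def tipos(linea):
--     # Character-level scanner: no split(), no intermediate word list; a running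
--     # token buffer is flushed at each whitespace boundary and at end of line.
--     linea = linea.lower()
--     tipo_error = []
--     tipo_info = []
--     tipo_warning = []
--     word = ""
--     for ch in linea:
--         if ch.isspace():
--             if word == "error:":
--                 tipo_error.append(linea)
--             elif word == "info:":
--                 tipo_info.append(linea)
--             elif word == "warning:":
--                 tipo_warning.append(linea)
--             word = ""
--         else:
--             word += ch
--     if word == "error:":
--         tipo_error.append(linea)
--     elif word == "info:":
--         tipo_info.append(linea)
--     elif word == "warning:":
--         tipo_warning.append(linea)
--     return tipo_error, tipo_info, tipo_warning
-- ===== Notes on version B (the rewrite author's own statement) =====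
-- stated objective: alternative
-- what changed: Replaces split()-then-match (build the word list, loop over it with conditional appends) with a single character-level scan that maintains a running token buffer and flushes it at each whitespace boundary, never materialising the word list.
import Mathlib
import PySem

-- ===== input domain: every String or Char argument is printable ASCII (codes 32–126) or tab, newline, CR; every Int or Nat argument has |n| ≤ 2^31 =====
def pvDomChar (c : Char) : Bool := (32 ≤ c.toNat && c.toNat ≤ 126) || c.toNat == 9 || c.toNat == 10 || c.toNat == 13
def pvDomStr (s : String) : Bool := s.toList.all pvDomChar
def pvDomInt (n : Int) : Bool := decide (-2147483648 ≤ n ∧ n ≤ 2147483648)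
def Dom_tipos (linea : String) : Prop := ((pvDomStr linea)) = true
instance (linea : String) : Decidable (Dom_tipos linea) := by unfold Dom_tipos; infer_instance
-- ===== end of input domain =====

-- B replaces split()-then-match with a single character-level scan flushing a token buffer at whitespace; same cost, different traversal.

-- ===== PORT A =====
def tipos (linea : String) : List String × List String × List String :=
  let linea' := PySem.Str.lower linea
  let palabras := PySem.Str.split₀ linea'
  let st := palabras.foldl (fun (acc : List String × List String × List String) palabra =>
      let acc := if palabra = "info:" then (acc.1, acc.2.1 ++ [linea'], acc.2.2) else acc
      let acc := if palabra = "error:" then (acc.1 ++ [linea'], acc.2.1, acc.2.2) else acc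
      if palabra = "warning:" then (acc.1, acc.2.1, acc.2.2 ++ [linea']) else acc)
    ([], [], [])
  (st.1, st.2.1, st.2.2)

-- ===== PORT B =====
-- flush: the `if word == …/elif/elif` block that B's Python runs at each boundary and at the end
def tipoFlush (l : String) (word : List Char)
    (st : List String × List String × List String) : List String × List String × List String :=
  if word = "error:".toList then (st.1 ++ [l], st.2.1, st.2.2)
  else if word = "info:".toList then (st.1, st.2.1 ++ [l], st.2.2)
  else if word = "warning:".toList then (st.1, st.2.1, st.2.2 ++ [l])
  else st

-- the `for ch in linea` character scan with its running token buffer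
def tipoScan (l : String) : List Char → List Char → (List String × List String × List String) → (List String × List String × List String)
  | [], word, st => tipoFlush l word st
  | c :: cs, word, st =>
      if PySem.Chars.isspace c then tipoScan l cs [] (tipoFlush l word st)
      else tipoScan l cs (word ++ [c]) st

def tipos_alt (linea : String) : List String × List String × List String :=
  let linea' := PySem.Str.lower linea
  tipoScan linea' linea'.toList [] ([], [], [])

-- ===== PRECONDITION & SPEC =====
def Spec_tipos (linea : String) (out : List String × List String × List String) : Prop := out = tipos_alt linea
instance (linea : String) (out : List String × List String × List String) : Decidable (Spec_tipos linea out) := by unfold Spec_tipos; infer_instance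

-- ===== CLAIM (what is proved, stated in full; the proofs are below) =====
def Claim_equal_tipos : Prop := ∀ (linea : String), Dom_tipos linea → Spec_tipos linea (tipos linea)

-- ===== LEMMAS AND PROOFS =====

theorem cons_replicate_comm {α : Type} (n : Nat) (l : α) :
    l :: List.replicate n l = List.replicate n l ++ [l] := by
  rw [← List.replicate_succ, List.replicate_succ']

-- split₀.go's accumulator only prepends finished words
theorem split0_go_acc (cs cur : List Char) (acc : List (List Char)) :
    PySem.Chars.split₀.go cs cur acc = acc.reverse ++ PySem.Chars.split₀.go cs cur [] := by
  induction cs generalizing cur acc with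
  | nil => by_cases h : cur.isEmpty <;> simp [PySem.Chars.split₀.go, h]
  | cons c cs ih =>
    by_cases hs : PySem.Chars.isspace c <;> by_cases h : cur.isEmpty <;>
      simp only [PySem.Chars.split₀.go, hs, h, if_true, if_false, Bool.false_eq_true]
    · exact ih [] acc
    · rw [ih [] (cur.reverse :: acc), ih [] [cur.reverse]]; simp
    · exact ih (c :: cur) acc
    · exact ih (c :: cur) acc

-- B's scan computes, for each keyword, (count in the words of the rest) copies of the line
theorem tipoScan_eq_counts (l : String) (cs word : List Char) (e i w : List String) :
    tipoScan l cs word (e, i, w) =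
      (e ++ List.replicate ((PySem.Chars.split₀.go cs word.reverse []).count "error:".toList) l,
       i ++ List.replicate ((PySem.Chars.split₀.go cs word.reverse []).count "info:".toList) l,
       w ++ List.replicate ((PySem.Chars.split₀.go cs word.reverse []).count "warning:".toList) l) := by
  induction cs generalizing word e i w with
  | nil =>
    by_cases h0 : word = []
    · simp [tipoScan, tipoFlush, PySem.Chars.split₀.go, h0]
    · have : word.reverse.isEmpty = false := by simp [h0]
      by_cases h1 : word = "error:".toList <;> by_cases h2 : word = "info:".toList <;>
        by_cases h3 : word = "warning:".toList <;>
        simp_all [tipoScan, tipoFlush, PySem.Chars.split₀.go]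
  | cons c cs ih =>
    by_cases hs : PySem.Chars.isspace c
    · by_cases h0 : word = []
      · simp [tipoScan, tipoFlush, PySem.Chars.split₀.go, hs, h0, ih]
      · have hne : word.reverse.isEmpty = false := by simp [h0]
        rw [show tipoScan l (c :: cs) word (e, i, w) = tipoScan l cs [] (tipoFlush l word (e, i, w)) by
              simp [tipoScan, hs]]
        have hgo : PySem.Chars.split₀.go (c :: cs) word.reverse [] =
            word :: PySem.Chars.split₀.go cs [] [] := by
          rw [show PySem.Chars.split₀.go (c :: cs) word.reverse [] =
                PySem.Chars.split₀.go cs [] [word.reverse.reverse] by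
                simp [PySem.Chars.split₀.go, hs, hne]]
          rw [split0_go_acc]; simp
        rw [hgo]
        by_cases h1 : word = "error:".toList <;> by_cases h2 : word = "info:".toList <;>
          by_cases h3 : word = "warning:".toList <;>
          simp_all [tipoFlush, List.replicate_succ', List.append_assoc,
                    cons_replicate_comm]
    · rw [show tipoScan l (c :: cs) word (e, i, w) = tipoScan l cs (word ++ [c]) (e, i, w) by
            simp [tipoScan, hs]]
      rw [ih]
      simp [PySem.Chars.split₀.go, hs]

-- A's foldl over the word list computes the same counts (over String words)
theorem tipos_foldl_inv (l : String) (ws : List String) (e i w : List String) :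
    ws.foldl (fun (acc : List String × List String × List String) palabra =>
      let acc := if palabra = "info:" then (acc.1, acc.2.1 ++ [l], acc.2.2) else acc
      let acc := if palabra = "error:" then (acc.1 ++ [l], acc.2.1, acc.2.2) else acc
      if palabra = "warning:" then (acc.1, acc.2.1, acc.2.2 ++ [l]) else acc)
      (e, i, w) =
    (e ++ List.replicate (ws.count "error:") l,
     i ++ List.replicate (ws.count "info:") l,
     w ++ List.replicate (ws.count "warning:") l) := by
  induction ws generalizing e i w with
  | nil => simp
  | cons p ps ih =>
    simp only [List.foldl_cons, List.count_cons]
    by_cases h1 : p = "info:" <;> by_cases h2 : p = "error:" <;> by_cases h3 : p = "warning:" <;>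
      simp_all [List.replicate_succ]

theorem count_map_ofList (W : List (List Char)) (k : List Char) :
    (W.map String.ofList).count (String.ofList k) = W.count k :=
  List.count_map_of_injective W String.ofList (fun a b h => by
    simpa using congrArg String.toList h) k

-- ===== VERDICT (by name: the statement is the Claim_ definition above) =====
theorem tipos_spec : Claim_equal_tipos := by
  intro linea _
  unfold Spec_tipos tipos tipos_alt
  simp only [tipos_foldl_inv, List.nil_append, tipoScan_eq_counts, List.reverse_nil]
  rw [show PySem.Str.split₀ (PySem.Str.lower linea)
        = (PySem.Chars.split₀ (PySem.Str.lower linea).toList).map String.ofList from rfl]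
  rw [show PySem.Chars.split₀ (PySem.Str.lower linea).toList
        = PySem.Chars.split₀.go (PySem.Str.lower linea).toList [] [] from rfl]
  rw [show ("error:" : String) = String.ofList "error:".toList from rfl,
      show ("info:" : String) = String.ofList "info:".toList from rfl,
      show ("warning:" : String) = String.ofList "warning:".toList from rfl]
  simp only [count_map_ofList]
  simp
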